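/- GENERATED by tools/from_farm_form.py from farm/worked/__asan_store4_noabort/Proof.lean (a worked proof of the farm's unit `__asan_store4_noabort`,
   accepted by the verdict) — do not edit. -/
import Asan.CheckWalk
import ProgX.Base.Spec.Units.asan_store4_noabort

open X86 X86.User Asan ProgX.Base

set_option maxRecDepth 4000
set_option maxHeartbeats 4000000

/-- `__asan_store4_noabort` satisfies its contract `Asan.SmallCheck`: entered with four accessible bytes it returns, changing
only rax rcx rdx rsp and the flags; its four paths into `__asan_report` are infeasible from `AccessibleSmall`. -/
theorem ProgX.Base.Spec.Proved.asan_store4_noabort_ok : ProgX.Base.Spec.asan_store4_noabort.Statement := by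
  intro Lay hLay μ hμ u₀ hcode
  refine SmallCheck.mk' (by omega) (by decide) ?_
  intro u ret hrip hcodeOK hsp hret hretlt hacc
  obtain ⟨hsealed, hceil, hA⟩ := hacc
  -- the two shadow bytes the routine looks at (asan_rt.c:50 and :27), and what `Accessible` says of them
  have hs1 := shadowOf_lt u.mem ((u.reg .rdi).toNat / 8)
  have hs2 := shadowOf_lt u.mem (((u.reg .rdi).toNat + 4 - 1) / 8)
  have hfirst := fun h => hA.first_zero (by decide) h
  have hlast := hA.last_ok
  -- `lea rax, [rdi + 3]` (0x100729) does not wrap: the address is below the ceiling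
  have e3 : (u.reg .rdi + 3).toNat = (u.reg .rdi).toNat + 3 := toNat_add_ofNat (u.reg .rdi) 3 (by omega)
  have r1 : u.mem.readLE (u.reg .rdi >>> 3 + 12582912) 1 = shadowOf u.mem ((u.reg .rdi).toNat / 8) := readLE_shadow _ _
  have r2 : u.mem.readLE ((u.reg .rdi + 3) >>> 3 + 12582912) 1 = shadowOf u.mem (((u.reg .rdi).toNat + 4 - 1) / 8) := by
    have e4 : (u.reg .rdi).toNat + 4 - 1 = (u.reg .rdi).toNat + 3 := by omega
    rw [readLE_shadow, e3, e4]
  generalize shadowOf u.mem ((u.reg .rdi).toNat / 8) = s1 at *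
  generalize shadowOf u.mem (((u.reg .rdi).toNat + 4 - 1) / 8) = s2 at *
  -- (a fact about the vector registers, so that the walk tracks them: `Checked.zmm`)
  have hzmm : u.zmm = u.zmm := rfl
  -- one walk over all eight paths, 0x100720 … 0x10076a
  u_walk hcode [hμ.vendor] span [ProgX.Base.L.textLo, ProgX.Base.L.textHi] side (v_side)
  all_goals first
    | -- a returning path (0x10075b `ret`): the state after the `ret` is `Checked`
      (refine ReachVia.done ⟨w_rip, w_rsp, RegsKept.mono_all w_kept (by rfl), w_mem, w_zmm, w_mxcsr, ?_⟩
       rw [w_flags]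
       exact X86.User.df_setStatus _ _)
    | -- a failing path (its side conditions, and the state at `__asan_report`): infeasible, the bytes are accessible
      (exfalso
       simp only [toNat_shr3, e3, byte_toNat _ hs2, byte_toInt _ hs2, and7_toInt, part32_toNat] at *
       omega)
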